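-- pv_equiv track=rewrite | github.com/sunilsoni/interview-notes-python | com/interview/2025/october/test1/test3.py | solution
-- ===== SOURCE A (Python) =====
-- from collections import Counter
--
-- def solution(matrix):
--     n=len(matrix)
--     m=len(matrix[0])
--     row_freq=[Counter(row) for row in matrix]
--     col_freq=[Counter(matrix[r][c] for r in range(n)) for c in range(m)]
--     ans=0
--     for r in range(n):
--         fr=row_freq[r]
--         for c in range(m):
--             x=matrix[r][c]
--             if m==1:
--                 row_ok=True; row_v=None
--             else:
--                 if fr[x]==m:
--                     row_ok=True; row_v=x
--                 elif len(fr)==2 and fr[x]==1: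
--                     row_ok=True; row_v=next(k for k in fr if k!=x)
--                 else:
--                     row_ok=False; row_v=None
--             fc=col_freq[c]
--             if n==1:
--                 col_ok=True; col_v=None
--             else:
--                 if fc[x]==n:
--                     col_ok=True; col_v=x
--                 elif len(fc)==2 and fc[x]==1:
--                     col_ok=True; col_v=next(k for k in fc if k!=x)
--                 else:
--                     col_ok=False; col_v=None
--             if row_ok and col_ok:
--                 if row_v is not None and col_v is not None:
--                     if row_v==col_v:
--                         ans+=1
--                 else:
--                     ans+=1
--     return ans
-- ===== SOURCE B (Python) =====
-- def _verdicts(line, T):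
--     # Per-position verdict (ok, designated value or None=wildcard) of one line judged
--     # against the grid size T, via sorting positions by value and sweeping equal-value
--     # runs: cnt[p] = multiplicity of line[p], runs = number of distinct values.
--     L = len(line)
--     if T == 1:
--         return [(True, None)] * L
--     if L == 0:
--         return []
--     order = sorted(range(L), key=lambda p: line[p])
--     cnt = [0] * L
--     runs = 0
--     i = 0
--     while i < L:
--         j = i
--         while j < L and line[order[j]] == line[order[i]]:
--             j += 1
--         runs += 1
--         for k in range(i, j):
--             cnt[order[k]] = j - i
--         i = j
--     lo, hi = line[order[0]], line[order[-1]]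
--     out = []
--     for x, c in zip(line, cnt):
--         if c == T:
--             out.append((True, x))
--         elif runs == 2 and c == 1:
--             out.append((True, hi if x == lo else lo))
--         else:
--             out.append((False, None))
--     return out
--
-- def solution(matrix):
--     n, m = len(matrix), len(matrix[0])
--     row_v = [_verdicts(row, m) for row in matrix]
--     col_v = [_verdicts([row[c] for row in matrix], n) for c in range(m)]
--     ans = 0
--     for r in range(n):
--         for c in range(m):
--             rok, rv = row_v[r][c]
--             cok, cv = col_v[c][r]
--             if rok and cok and (rv is None or cv is None or rv == cv):
--                 ans += 1
--     return ans
-- ===== Notes on version B (the rewrite author's own statement) =====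
-- stated objective: alternative
-- what changed: B drops the hash-map frequency Counters entirely: it sorts each line's cell positions by value and sweeps the equal-value runs once, writing every position's multiplicity, the number of distinct values and the two extreme values into plain arrays, so the per-cell decision reads precomputed arrays instead of querying Counters and scanning their keys.
import Mathlib
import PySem

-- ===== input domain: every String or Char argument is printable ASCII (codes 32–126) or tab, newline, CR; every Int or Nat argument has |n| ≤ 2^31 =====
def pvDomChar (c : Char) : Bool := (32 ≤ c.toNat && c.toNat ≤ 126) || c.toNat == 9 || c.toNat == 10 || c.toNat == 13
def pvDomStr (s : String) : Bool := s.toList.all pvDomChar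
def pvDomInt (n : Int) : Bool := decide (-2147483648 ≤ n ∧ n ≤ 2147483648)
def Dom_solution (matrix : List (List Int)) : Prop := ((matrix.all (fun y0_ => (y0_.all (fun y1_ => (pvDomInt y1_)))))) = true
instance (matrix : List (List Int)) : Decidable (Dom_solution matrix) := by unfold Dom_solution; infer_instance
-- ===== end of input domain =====

-- B replaces the hash-map frequency Counters by a per-line sort of cell positions with one
-- run sweep filling multiplicity/distinct/extreme arrays; the per-cell decision reads arrays
-- only (equal return values proved on every admitted input).


-- ===== PORT A =====
-- A's row/column if-chain is textually duplicated in the Python; ported once as a helper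
-- applied to (fr, m) and (fc, n).  `f.keys.find? (· != x)` is `next(k for k in fr if k != x)`
-- (the guard `size == 2 && f[x] == 1` guarantees the generator is non-empty, as in Python).
def lineVerdict (f : PySem.Dict Int Int) (L : Int) (x : Int) : Bool × Option Int :=
  if L == 1 then (true, none)
  else if f.getD x 0 == L then (true, some x)
  else if f.size == 2 && f.getD x 0 == 1 then (true, f.keys.find? (fun k => k != x))
  else (false, none)

def solution (matrix : List (List Int)) : Int :=
  let n : Int := matrix.length
  let m : Int := (PySem.List.pyGetD matrix 0 []).length   -- len(matrix[0]); Pre_ excludes matrix = [] (IndexError)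
  let row_freq : List (PySem.Dict Int Int) := matrix.map PySem.Dict.counter
  let col_freq : List (PySem.Dict Int Int) :=
    (PySem.List.pyRange 0 m).map (fun c =>
      PySem.Dict.counter ((PySem.List.pyRange 0 n).map (fun r =>
        PySem.List.pyGetD (PySem.List.pyGetD matrix r []) c 0)))   -- matrix[r][c]; Pre_ excludes rows shorter than row 0 (IndexError)
  (PySem.List.pyRange 0 n).foldl (fun ans r =>
    let fr := PySem.List.pyGetD row_freq r (PySem.Dict.counter [])
    (PySem.List.pyRange 0 m).foldl (fun ans c =>
      let x := PySem.List.pyGetD (PySem.List.pyGetD matrix r []) c 0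
      let rp := lineVerdict fr m x
      let fc := PySem.List.pyGetD col_freq c (PySem.Dict.counter [])
      let cp := lineVerdict fc n x
      if rp.1 && cp.1 then
        match rp.2, cp.2 with
        | some rv, some cv => if rv == cv then ans + 1 else ans
        | _, _ => ans + 1
      else ans) ans) 0

-- ===== PORT B =====
-- the run sweep of _verdicts: over the value-sorted position list take each equal-value run,
-- write its length into cnt at every position of the run, count the run, recurse on the rest
-- (the two nested whiles of Source B; positions are in range, so `.set q.toNat` is exact).
def sweepB (line : List Int) : List Int → List Int → Int → List Int × Int
  | [], cnt, runs => (cnt, runs)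
  | p :: rest, cnt, runs =>
    let v := PySem.List.pyGetD line p 0
    let run := (p :: rest).takeWhile (fun q => PySem.List.pyGetD line q 0 == v)
    sweepB line ((p :: rest).dropWhile (fun q => PySem.List.pyGetD line q 0 == v))
      (run.foldl (fun acc q => acc.set q.toNat (run.length : Int)) cnt) (runs + 1)
  termination_by l => l.length
  decreasing_by
    simp only [List.dropWhile_cons, beq_self_eq_true, if_pos]
    exact Nat.lt_succ_of_le (List.length_dropWhile_le _ _)

-- _verdicts(line, T): per-position (ok, designated-or-wildcard) verdicts of one line
def verdictsB (line : List Int) (T : Int) : List (Bool × Option Int) :=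
  if T == 1 then List.replicate line.length (true, none)
  else if line.length == 0 then []
  else
    let order := PySem.List.sorted (PySem.List.pyRange 0 (line.length : Int))
      (fun p => PySem.List.pyGetD line p 0) false
    let cr := sweepB line order (List.replicate line.length 0) 0
    let lo := PySem.List.pyGetD line (PySem.List.pyGetD order 0 0) 0
    let hi := PySem.List.pyGetD line (PySem.List.pyGetD order (-1) 0) 0
    (line.zip cr.1).map (fun xc =>
      if xc.2 == T then (true, some xc.1)
      else if cr.2 == 2 && xc.2 == 1 then (true, some (if xc.1 == lo then hi else lo))
      else (false, none))

def solution_alt (matrix : List (List Int)) : Int :=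
  let n : Int := matrix.length
  let m : Int := (PySem.List.pyGetD matrix 0 []).length   -- len(matrix[0]); raises on [] exactly like A (outside Pre_)
  let row_v := matrix.map (fun row => verdictsB row m)
  let col_v := (PySem.List.pyRange 0 m).map (fun c =>
    verdictsB (matrix.map (fun row => PySem.List.pyGetD row c 0)) n)
  (PySem.List.pyRange 0 n).foldl (fun ans r =>
    (PySem.List.pyRange 0 m).foldl (fun ans c =>
      let rp := PySem.List.pyGetD (PySem.List.pyGetD row_v r []) c (false, none)
      let cp := PySem.List.pyGetD (PySem.List.pyGetD col_v c []) r (false, none)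
      if rp.1 && cp.1 && (rp.2.isNone || cp.2.isNone || rp.2 == cp.2) then ans + 1
      else ans) ans) 0

-- ===== PRECONDITION & SPEC =====
-- Pre_ excludes exactly the inputs on which A raises IndexError: the empty matrix (matrix[0])
-- and matrices with a row shorter than row 0 (matrix[r][c] in the column Counters).
def Pre_solution (matrix : List (List Int)) : Prop :=
  matrix ≠ [] ∧ ∀ row ∈ matrix, (matrix.headD []).length ≤ row.length
instance (matrix : List (List Int)) : Decidable (Pre_solution matrix) := by
  unfold Pre_solution; infer_instance

def pvWitness_solution : List (List Int) := [[1, 2], [2, 1]]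

def Spec_solution (matrix : List (List Int)) (out : Int) : Prop := out = solution_alt matrix
instance (matrix : List (List Int)) (out : Int) : Decidable (Spec_solution matrix out) := by unfold Spec_solution; infer_instance

-- ===== CLAIM (what is proved, stated in full; the proofs are below) =====
def Claim_equal_solution : Prop := ∀ (matrix : List (List Int)), Dom_solution matrix → Pre_solution matrix → Spec_solution matrix (solution matrix)

-- ===== LEMMAS AND PROOFS =====

lemma length_foldl_set (run : List Int) (cnt : List Int) (val : Int) :
    (run.foldl (fun acc q => acc.set q.toNat val) cnt).length = cnt.length := by
  induction run generalizing cnt with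
  | nil => rfl
  | cons q t ih => simp [List.foldl_cons, ih]

lemma getD_foldl_set (run : List Int) (cnt : List Int) (val : Int) (k : Nat)
    (h0 : ∀ q ∈ run, 0 ≤ q) :
    (run.foldl (fun acc q => acc.set q.toNat val) cnt).getD k 0
      = if (k : Int) ∈ run ∧ k < cnt.length then val else cnt.getD k 0 := by
  induction run generalizing cnt with
  | nil => simp
  | cons q t ih =>
    have hq0 : 0 ≤ q := h0 q (List.mem_cons_self ..)
    rw [List.foldl_cons, ih _ (fun x hx => h0 x (List.mem_cons_of_mem _ hx))]
    rw [List.length_set]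
    by_cases hkt : (k : Int) ∈ t ∧ k < cnt.length
    · simp [hkt.1, hkt.2]
    · rw [if_neg hkt]
      by_cases hkq : q.toNat = k
      · have hkq' : (k : Int) = q := by omega
        by_cases hl : k < cnt.length
        · have : (cnt.set q.toNat val).getD k 0 = val := by
            rw [List.getD_eq_getElem?_getD, ← hkq]
            rw [List.getElem?_set_self (by omega)]
            simp
          rw [this, if_pos ⟨by simp [hkq'], hl⟩]
        · have h1 : (cnt.set q.toNat val).getD k 0 = 0 := by
            rw [List.getD_eq_getElem?_getD, List.getElem?_eq_none (by simp; omega)]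
            rfl
          have h2 : cnt.getD k 0 = 0 := by
            rw [List.getD_eq_getElem?_getD, List.getElem?_eq_none (by omega)]
            rfl
          rw [h1, if_neg (by tauto), h2]
      · have hne : (k : Int) ≠ q := by omega
        have : (cnt.set q.toNat val).getD k 0 = cnt.getD k 0 := by
          rw [List.getD_eq_getElem?_getD, List.getElem?_set_ne (by omega),
            ← List.getD_eq_getElem?_getD]
        rw [this, if_neg ?_]
        rintro ⟨hmem, hlen⟩
        rcases List.mem_cons.mp hmem with h | h
        · exact hne h
        · exact hkt ⟨h, hlen⟩

lemma sweepB_eq (line : List Int) (p : Int) (rest cnt : List Int) (runs : Int) :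
    sweepB line (p :: rest) cnt runs
      = sweepB line
          ((p :: rest).dropWhile (fun q => PySem.List.pyGetD line q 0 == PySem.List.pyGetD line p 0))
          (((p :: rest).takeWhile (fun q => PySem.List.pyGetD line q 0 == PySem.List.pyGetD line p 0)).foldl
            (fun acc q => acc.set q.toNat
              ((((p :: rest).takeWhile (fun q => PySem.List.pyGetD line q 0 == PySem.List.pyGetD line p 0)).length : Int))) cnt)
          (runs + 1) := by
  rw [sweepB]

lemma dropWhile_head_false {α : Type} (p : α → Bool) (l : List α) {w : α} {t : List α}
    (h : l.dropWhile p = w :: t) : p w = false := by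
  induction l with
  | nil => simp at h
  | cons a l ih =>
    by_cases ha : p a
    · rw [List.dropWhile_cons, if_pos ha] at h
      exact ih h
    · rw [List.dropWhile_cons, if_neg ha] at h
      cases h
      exact Bool.not_eq_true _ ▸ (by simpa using ha)

lemma sweepB_spec (line : List Int) (rest cnt : List Int) (runs : Int)
    (h0 : ∀ q ∈ rest, 0 ≤ q)
    (hp : rest.Pairwise (fun a b => PySem.List.pyGetD line a 0 ≤ PySem.List.pyGetD line b 0)) :
    (sweepB line rest cnt runs).1.length = cnt.length
    ∧ (sweepB line rest cnt runs).2
        = runs + (((rest.map (fun q => PySem.List.pyGetD line q 0)).toFinset.card : Int))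
    ∧ ∀ k : Nat, (sweepB line rest cnt runs).1.getD k 0
        = if (k : Int) ∈ rest ∧ k < cnt.length
          then ((rest.map (fun q => PySem.List.pyGetD line q 0)).count (PySem.List.pyGetD line (k : Int) 0) : Int)
          else cnt.getD k 0 := by
  induction rest, cnt, runs using sweepB.induct line with
  | case1 cnt runs => simp [sweepB]
  | case2 p rest cnt runs v0 run0 ih =>
    have hstep := sweepB_eq line p rest cnt runs
    set value : Int → Int := fun q => PySem.List.pyGetD line q 0 with hvalue
    set pred : Int → Bool := fun q => value q == value p with hpred
    set run : List Int := (p :: rest).takeWhile pred with hrun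
    set rest' : List Int := (p :: rest).dropWhile pred with hrest'
    set v : Int := value p with hv
    set cnt' : List Int := run.foldl (fun acc q => acc.set q.toNat (run.length : Int)) cnt with hcnt'
    have hsplit : run ++ rest' = p :: rest := List.takeWhile_append_dropWhile
    have hrunv : ∀ q ∈ run, value q = v := by
      intro q hq
      have := List.mem_takeWhile_imp hq
      simpa [hpred] using this
    have hrunp : run = p :: rest.takeWhile pred := by
      rw [hrun, List.takeWhile_cons, if_pos (by simp [hpred, hv])]
    have hmem' : ∀ q ∈ rest', q ∈ p :: rest := by
      intro q hq
      rw [← hsplit]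
      exact List.mem_append_right _ hq
    have hpair' : (run ++ rest').Pairwise (fun a b => value a ≤ value b) := by
      rw [hsplit]; exact hp
    have hcross := (List.pairwise_append.mp hpair').2.2
    have hpr' : rest'.Pairwise (fun a b => value a ≤ value b) :=
      (List.pairwise_append.mp hpair').2.1
    have hrest'v : ∀ q ∈ rest', v < value q := by
      cases hr' : rest' with
      | nil => simp
      | cons w t' =>
        have hw : pred w = false := dropWhile_head_false pred (p :: rest) (by rw [← hrest', hr'])
        have hwv : value w ≠ v := by simpa [hpred] using hw
        have hvw : v ≤ value w := by
          refine hcross p ?_ w (by simp [hr'])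
          rw [hrunp]; exact List.mem_cons_self ..
        have hwlt : v < value w := lt_of_le_of_ne hvw (Ne.symm hwv)
        intro q hq
        rcases List.mem_cons.mp hq with rfl | hq
        · exact hwlt
        · have : value w ≤ value q := by
            rw [hr'] at hpr'
            exact (List.pairwise_cons.mp hpr').1 q hq
          omega
    have hrep : run.map value = List.replicate run.length v := by
      have hmm : ∀ b ∈ run.map value, b = v := by
        intro b hb
        rcases List.mem_map.mp hb with ⟨q, hq, rfl⟩
        exact hrunv q hq
      simpa using List.eq_replicate_of_mem hmm
    have hvnot : v ∉ rest'.map value := by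
      intro h
      rcases List.mem_map.mp h with ⟨q, hq, hqv⟩
      exact absurd hqv.symm (ne_of_lt (hrest'v q hq))
    have hmapsplit : (p :: rest).map value = run.map value ++ rest'.map value := by
      rw [← hsplit, List.map_append]
    have hrunlen : 0 < run.length := by rw [hrunp]; simp
    obtain ⟨ihlen, ihruns, ihcnt⟩ := ih (fun q hq => h0 q (hmem' q hq)) hpr'
    have hcntlen : cnt'.length = cnt.length := length_foldl_set run cnt _
    refine ⟨?_, ?_, ?_⟩
    · rw [hstep, ihlen, hcntlen]
    · rw [hstep, ihruns]
      have hfin : ((p :: rest).map value).toFinset = insert v (rest'.map value).toFinset := by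
        rw [hmapsplit, List.toFinset_append, hrep]
        have h1 : (List.replicate run.length v).toFinset = {v} :=
          List.toFinset_replicate_of_ne_zero (by omega)
        rw [h1, ← Finset.insert_eq]
      rw [hfin, Finset.card_insert_of_notMem (by simpa using hvnot)]
      push_cast
      ring
    · intro k
      rw [hstep, ihcnt k, hcntlen, hcnt', getD_foldl_set run cnt _ k
        (fun q hq => h0 q (by rw [← hsplit]; exact List.mem_append_left _ hq))]
      have hcv : ((p :: rest).map value).count v = run.length := by
        rw [hmapsplit, List.count_append, hrep, List.count_replicate_self,
          List.count_eq_zero_of_not_mem hvnot, Nat.add_zero]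
      by_cases hk1 : (k : Int) ∈ rest' ∧ k < cnt.length
      · rw [if_pos hk1, if_pos ⟨hmem' _ hk1.1, hk1.2⟩]
        have hkv : value (k : Int) ≠ v := ne_of_gt (hrest'v _ hk1.1)
        have heq : ((p :: rest).map value).count (value (k : Int))
            = (rest'.map value).count (value (k : Int)) := by
          rw [hmapsplit, List.count_append, hrep, List.count_replicate, if_neg ?_, Nat.zero_add]
          simpa using Ne.symm hkv
        rw [heq]
      · rw [if_neg hk1]
        by_cases hk2 : (k : Int) ∈ run ∧ k < cnt.length
        · rw [if_pos hk2, if_pos ⟨by rw [← hsplit]; exact List.mem_append_left _ hk2.1, hk2.2⟩]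
          rw [show PySem.List.pyGetD line (k : Int) 0 = value (k : Int) from rfl, hrunv _ hk2.1, hcv]
        · rw [if_neg hk2, if_neg ?_]
          rintro ⟨hmem, hlen⟩
          rw [← hsplit] at hmem
          rcases List.mem_append.mp hmem with h | h
          · exact hk2 ⟨h, hlen⟩
          · exact hk1 ⟨h, hlen⟩

def lineLo (line : List Int) : Int := (PySem.List.sorted line (fun y => y) false).headD 0
def lineHi (line : List Int) : Int := (PySem.List.sorted line (fun y => y) false).getLastD 0

def specV (line : List Int) (T x : Int) : Bool × Option Int :=
  if T = 1 then (true, none)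
  else if (line.count x : Int) = T then (true, some x)
  else if (PySem.Set.ofList line).length = 2 ∧ line.count x = 1 then
    (true, some (if x = lineLo line then lineHi line else lineLo line))
  else (false, none)

lemma order_map_value (line : List Int) :
    (PySem.List.sorted (PySem.List.pyRange 0 (line.length : Int))
        (fun p => PySem.List.pyGetD line p 0) false).map (fun p => PySem.List.pyGetD line p 0)
      = PySem.List.sorted line (fun y => y) false := by
  refine PySem.List.eq_of_perm_of_pairwise_le_of_injective (fun y => y) (fun a b h => h) ?_ ?_ ?_
  · refine List.Perm.trans (List.Perm.map _ (PySem.List.sorted_perm _ _ _)) ?_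
    rw [PySem.List.map_pyGetD_pyRange_zero' line 0]
    exact (PySem.List.sorted_perm _ _ _).symm
  · exact List.pairwise_map.mpr (PySem.List.sorted_pairwise _ _)
  · exact PySem.List.sorted_pairwise _ _

lemma ofList_length_eq_card (xs : List Int) :
    (PySem.Set.ofList xs).length = xs.toFinset.card := by
  rw [← List.toFinset_card_of_nodup (PySem.Set.nodup_ofList xs)]
  congr 1
  ext y
  simp [List.mem_toFinset, PySem.Set.mem_ofList]

lemma ifs_eq (T : Int) (a n : Nat) (x lo hi : Int) :
    (if (((a : Nat) : Int) == T) = true then ((true : Bool), some x)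
     else if ((((n : Nat) : Int)) == 2 && ((((a : Nat) : Int)) == 1)) = true then
       ((true : Bool), some (if (x == lo) = true then hi else lo))
     else ((false : Bool), none))
    = (if ((a : Nat) : Int) = T then ((true : Bool), some x)
       else if n = 2 ∧ a = 1 then ((true : Bool), some (if x = lo then hi else lo))
       else ((false : Bool), none)) := by
  by_cases h2 : ((a : Nat) : Int) = T
  · simp [h2]
  · have hn2 : (((n : Nat) : Int) = 2) ↔ n = 2 := by omega
    have ha1 : (((a : Nat) : Int) = 1) ↔ a = 1 := by omega
    by_cases h3 : n = 2 <;> by_cases h4 : a = 1 <;>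
      simp [h2, h3, h4, hn2, ha1]

lemma verdictsB_getD (line : List Int) (T : Int) (c : Nat) (hc : c < line.length) :
    (verdictsB line T).getD c (false, none) = specV line T (line.getD c 0) := by
  by_cases hT : T = 1
  · simp [verdictsB, specV, hT, List.getD_eq_getElem?_getD, hc]
  have hTb : (T == 1) = false := by simp [hT]
  have hL : line.length ≠ 0 := by omega
  have hLb : (line.length == 0) = false := by simp [hL]
  rw [verdictsB, hTb, hLb]
  simp only [Bool.false_eq_true, if_false]
  set value : Int → Int := fun p => PySem.List.pyGetD line p 0 with hvalue
  set order : List Int := PySem.List.sorted (PySem.List.pyRange 0 (line.length : Int)) value false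
    with horder
  have homv : order.map value = PySem.List.sorted line (fun y => y) false := order_map_value line
  have hmemo : ∀ q ∈ order, 0 ≤ q ∧ q < (line.length : Int) := by
    intro q hq
    rw [horder, PySem.List.mem_sorted] at hq
    exact PySem.List.mem_pyRange_one.mp hq
  obtain ⟨hslen, hsruns, hscnt⟩ := sweepB_spec line order (List.replicate line.length 0) 0
    (fun q hq => (hmemo q hq).1) (PySem.List.sorted_pairwise _ _)
  set cr := sweepB line order (List.replicate line.length 0) 0 with hcr
  rw [List.length_replicate] at hslen hscnt
  have hsvperm : (order.map value).Perm line := by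
    rw [homv]; exact PySem.List.sorted_perm _ _ _
  have hone : order ≠ [] := by
    rw [horder, Ne, PySem.List.sorted_eq_nil_iff]
    intro h
    have : (0 : Int) ∈ PySem.List.pyRange 0 (line.length : Int) :=
      PySem.List.mem_pyRange_one.mpr ⟨le_refl _, by exact_mod_cast Nat.pos_of_ne_zero hL⟩
    rw [h] at this
    simp at this
  have hlo : value (PySem.List.pyGetD order 0 0) = lineLo line := by
    cases ho : order with
    | nil => exact absurd ho hone
    | cons o t =>
      rw [PySem.List.pyGetD_zero_cons]
      have : (order.map value).headD 0 = value o := by rw [ho]; rfl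
      rw [lineLo, ← homv, this]
  have hhi : value (PySem.List.pyGetD order (-1) 0) = lineHi line := by
    rw [PySem.List.pyGetD_neg_one order 0 hone]
    have h1 : (order.map value).getLast? = some (value (order.getLast hone)) := by
      rw [List.getLast?_map, List.getLast?_eq_some_getLast hone]
      rfl
    rw [lineHi, ← homv, List.getLastD_eq_getLast?, h1]
    rfl
  have hclen : c < (line.zip cr.1).length := by
    rw [List.length_zip, hslen]
    omega
  rw [List.getD_eq_getElem _ _ (by rw [List.length_map]; exact hclen), List.getElem_map,
    List.getElem_zip]
  have hcnt : cr.1[c]'(by rw [hslen]; exact hc) = (line.count (line.getD c 0) : Int) := by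
    have hmemoc : (c : Int) ∈ order := by
      rw [horder, PySem.List.mem_sorted]
      exact PySem.List.mem_pyRange_one.mpr ⟨Int.natCast_nonneg c, by exact_mod_cast hc⟩
    have h1 : cr.1.getD c 0 = (line.count (line.getD c 0) : Int) := by
      rw [hscnt c, if_pos ⟨hmemoc, hc⟩, List.Perm.count_eq hsvperm, PySem.List.pyGetD_natCast]
    rw [← h1, List.getD_eq_getElem _ _ (by rw [hslen]; exact hc)]
  have hruns : cr.2 = ((PySem.Set.ofList line).length : Int) := by
    rw [hsruns, ofList_length_eq_card, ← List.toFinset_eq_of_perm _ _ hsvperm]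
    simp
    try rfl
  have hxc : getElem line c hc = line.getD c 0 := (List.getD_eq_getElem line 0 hc).symm
  dsimp only
  rw [hcnt, hruns,
    show PySem.List.pyGetD line (PySem.List.pyGetD order 0 0) 0 = lineLo line from hlo,
    show PySem.List.pyGetD line (PySem.List.pyGetD order (-1) 0) 0 = lineHi line from hhi,
    hxc]
  rw [ifs_eq T, specV, if_neg hT]

lemma pairwise_le_getLast {l : List Int} (hp : l.Pairwise (· ≤ ·)) (h : l ≠ []) :
    ∀ y ∈ l, y ≤ l.getLast h := by
  induction l with
  | nil => simp
  | cons a t ih =>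
    intro y hy
    rcases List.mem_cons.mp hy with rfl | hy
    · cases t with
      | nil => simp [List.getLast]
      | cons b t' =>
        have hne : b :: t' ≠ [] := by simp
        rw [List.getLast_cons hne]
        exact (List.pairwise_cons.mp hp).1 _ (List.getLast_mem hne)
    · have hne : t ≠ [] := List.ne_nil_of_mem hy
      rw [List.getLast_cons hne]
      exact ih (List.pairwise_cons.mp hp).2 hne y hy

lemma lineLo_le (line : List Int) : ∀ y ∈ line, lineLo line ≤ y := by
  intro y hy
  cases hs : PySem.List.sorted line (fun z => z) false with
  | nil =>
    rw [(PySem.List.sorted_eq_nil_iff _ _ _).mp hs] at hy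
    simp at hy
  | cons m t =>
    have := PySem.List.key_head_sorted_le line (fun z => z) hs y hy
    simpa [lineLo, hs] using this

lemma le_lineHi (line : List Int) : ∀ y ∈ line, y ≤ lineHi line := by
  intro y hy
  have hne : PySem.List.sorted line (fun z => z) false ≠ [] := by
    rw [Ne, PySem.List.sorted_eq_nil_iff]
    exact fun h => by simp [h] at hy
  have hmem : y ∈ PySem.List.sorted line (fun z => z) false :=
    (PySem.List.mem_sorted _ _ _ _).mpr hy
  have := pairwise_le_getLast (PySem.List.sorted_pairwise line (fun z => z)) hne y hmem
  rw [lineHi, List.getLastD_eq_getLast?, List.getLast?_eq_some_getLast hne]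
  exact this

lemma lineLo_mem (line : List Int) (h : line ≠ []) : lineLo line ∈ line := by
  have hne : PySem.List.sorted line (fun z => z) false ≠ [] := by
    rw [Ne, PySem.List.sorted_eq_nil_iff]; exact h
  cases hs : PySem.List.sorted line (fun z => z) false with
  | nil => exact absurd hs hne
  | cons m t =>
    have : m ∈ line := by
      rw [← PySem.List.mem_sorted line (fun z => z) false, hs]
      exact List.mem_cons_self ..
    simpa [lineLo, hs] using this

lemma lineHi_mem (line : List Int) (h : line ≠ []) : lineHi line ∈ line := by
  have hne : PySem.List.sorted line (fun z => z) false ≠ [] := by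
    rw [Ne, PySem.List.sorted_eq_nil_iff]; exact h
  have : (PySem.List.sorted line (fun z => z) false).getLast hne ∈ line := by
    rw [← PySem.List.mem_sorted line (fun z => z) false]
    exact List.getLast_mem hne
  rw [lineHi, List.getLastD_eq_getLast?, List.getLast?_eq_some_getLast hne]
  exact this

lemma lineVerdict_eq_specV (line : List Int) (T x : Int) (hx : x ∈ line) :
    lineVerdict (PySem.Dict.counter line) T x = specV line T x := by
  have hnil : line ≠ [] := List.ne_nil_of_mem hx
  have hsz : (PySem.Dict.counter line).size = (PySem.Set.ofList line).length := by
    rw [← PySem.Dict.keys_counter]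
    simp [PySem.Dict.size, PySem.Dict.keys]
  rw [lineVerdict, specV]
  by_cases hT : T = 1
  · simp [hT]
  · have hTb : (T == 1) = false := by simp [hT]
    rw [hTb, if_neg hT]
    simp only [Bool.false_eq_true, if_false]
    rw [PySem.Dict.getD_counter]
    by_cases h2 : ((line.count x : Int)) = T
    · simp [h2]
    · have h2b : (((line.count x : Int)) == T) = false := by simp [h2]
      rw [h2b, if_neg h2]
      simp only [Bool.false_eq_true, if_false]
      by_cases h3 : (PySem.Set.ofList line).length = 2 ∧ line.count x = 1
      · have hb : ((PySem.Dict.counter line).size == 2 && (((line.count x : Nat) : Int) == 1)) = true := by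
          simp [hsz, h3.1, h3.2]
        rw [hb, if_pos h3]
        simp only [if_true]
        obtain ⟨a, b, hab⟩ := List.length_eq_two.mp h3.1
        have hnd : a ≠ b := by
          have := PySem.Set.nodup_ofList line
          rw [hab] at this
          simpa using this
        have hmemk : ∀ y : Int, y ∈ line ↔ (y = a ∨ y = b) := by
          intro y
          rw [← PySem.Set.mem_ofList line y, hab]
          simp
        have hxab := (hmemk x).mp hx
        have hloab := (hmemk _).mp (lineLo_mem line hnil)
        have hhiab := (hmemk _).mp (lineHi_mem line hnil)
        have hlohi : lineLo line ≠ lineHi line := by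
          intro heq
          have ha : a = lineLo line :=
            le_antisymm (heq ▸ le_lineHi line a ((hmemk a).mpr (Or.inl rfl)))
              (lineLo_le line a ((hmemk a).mpr (Or.inl rfl)))
          have hbb : b = lineLo line :=
            le_antisymm (heq ▸ le_lineHi line b ((hmemk b).mpr (Or.inr rfl)))
              (lineLo_le line b ((hmemk b).mpr (Or.inr rfl)))
          exact hnd (ha.trans hbb.symm)
        rw [PySem.Dict.keys_counter, hab]
        rcases hxab with rfl | rfl
        · have hfind : List.find? (fun k => k != x) [x, b] = some b := by
            have e2 : (b != x) = true := bne_iff_ne.mpr (Ne.symm hnd)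
            simp [List.find?, e2]
          rw [hfind]
          rcases hloab with hlo | hlo
          · rw [if_pos hlo.symm]
            rcases hhiab with hhi | hhi
            · exact absurd (hlo.trans hhi.symm) hlohi
            · rw [hhi]
          · rw [if_neg (fun h => hnd (h.trans hlo)), hlo]
        · have hfind : List.find? (fun k => k != x) [a, x] = some a := by
            have e2 : (a != x) = true := bne_iff_ne.mpr hnd
            simp [List.find?, e2]
          rw [hfind]
          rcases hloab with hlo | hlo
          · rw [if_neg (fun h => hnd (h.trans hlo).symm), hlo]
          · rw [if_pos hlo.symm]
            rcases hhiab with hhi | hhi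
            · rw [hhi]
            · exact absurd (hlo.trans hhi.symm) hlohi
      · have hb : ((PySem.Dict.counter line).size == 2 && (((line.count x : Nat) : Int) == 1)) = false := by
          rcases Decidable.not_and_iff_or_not.mp h3 with h | h
          · simp [hsz, h]
          · have : (((line.count x : Nat) : Int) == 1) = false := by
              simp
              omega
            simp [this]
        rw [hb, if_neg h3]
        simp

lemma body_eq (ans : Int) (rp cp : Bool × Option Int) :
    (if rp.1 && cp.1 then
       (match rp.2, cp.2 with
        | some rv, some cv => if rv == cv then ans + 1 else ans
        | _, _ => ans + 1)
     else ans)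
    = (if rp.1 && cp.1 && (rp.2.isNone || cp.2.isNone || rp.2 == cp.2) then ans + 1 else ans) := by
  rcases rp with ⟨b1, _ | v1⟩ <;> rcases cp with ⟨b2, _ | v2⟩ <;> cases b1 <;> cases b2 <;> simp

lemma map_pyRange_col (matrix : List (List Int)) (c : Int) :
    (PySem.List.pyRange 0 (matrix.length : Int)).map
      (fun r => PySem.List.pyGetD (PySem.List.pyGetD matrix r []) c 0)
      = matrix.map (fun row => PySem.List.pyGetD row c 0) := by
  conv_rhs => rw [← PySem.List.map_pyGetD_pyRange_zero' matrix ([] : List Int)]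
  rw [List.map_map]
  rfl

-- ===== VERDICT (by name: the statement is the Claim_ definition above) =====
theorem solution_spec : Claim_equal_solution := by
  intro matrix _hdom hpre
  obtain ⟨hne, hrect⟩ := hpre
  obtain ⟨r0, rest, rfl⟩ : ∃ r0 rest, matrix = r0 :: rest := by
    cases matrix with
    | nil => exact absurd rfl hne
    | cons a l => exact ⟨a, l, rfl⟩
  simp only [List.headD_cons] at hrect
  show solution (r0 :: rest) = solution_alt (r0 :: rest)
  unfold solution solution_alt
  simp only [PySem.List.pyGetD_zero_cons]
  set M : List (List Int) := r0 :: rest with hM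
  set n : Int := (M.length : Int) with hn
  set m : Int := (r0.length : Int) with hm
  refine PySem.List.foldl_congr_mem _ _ _ 0 ?_
  intro ans r hr
  obtain ⟨hr0, hrn⟩ := PySem.List.mem_pyRange_one.mp hr
  refine PySem.List.foldl_congr_mem _ _ _ ans ?_
  intro ans2 c hc
  obtain ⟨hc0, hcm⟩ := PySem.List.mem_pyRange_one.mp hc
  -- the row, the column, the cell value
  have hrn' : r.toNat < M.length := by omega
  have hrow : PySem.List.pyGetD M r [] = M[r.toNat]'hrn' :=
    PySem.List.pyGetD_eq_getElem M [] hr0 (by omega)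
  have hrowmem : PySem.List.pyGetD M r [] ∈ M := by
    rw [hrow]; exact List.getElem_mem hrn'
  have hrowlen : c.toNat < (PySem.List.pyGetD M r []).length := by
    have := hrect _ hrowmem
    omega
  set row : List Int := PySem.List.pyGetD M r [] with hrowdef
  set x : Int := PySem.List.pyGetD row c 0 with hxdef
  set col : List Int := M.map (fun rw => PySem.List.pyGetD rw c 0) with hcol
  have hxrow : x ∈ row := by
    rw [hxdef, PySem.List.pyGetD_eq_getElem row 0 hc0 (by omega)]
    exact List.getElem_mem _
  have hxcol : x ∈ col := by
    rw [hcol]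
    exact List.mem_map.mpr ⟨row, hrowmem, rfl⟩
  have hcollen : r.toNat < col.length := by rw [hcol, List.length_map]; exact hrn'
  -- A side: resolve the two Counter lookups
  have e1 : PySem.List.pyGetD (M.map PySem.Dict.counter) r (PySem.Dict.counter [])
      = PySem.Dict.counter row := PySem.List.pyGetD_map PySem.Dict.counter M r []
  have e3 : (PySem.List.pyRange 0 n).map (fun r => PySem.List.pyGetD (PySem.List.pyGetD M r []) c 0)
      = col := by
    rw [hn, map_pyRange_col M c]
  have e2 : PySem.List.pyGetD ((PySem.List.pyRange 0 m).map (fun c =>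
        PySem.Dict.counter ((PySem.List.pyRange 0 n).map (fun r =>
          PySem.List.pyGetD (PySem.List.pyGetD M r []) c 0)))) c (PySem.Dict.counter [])
      = PySem.Dict.counter col := by
    rw [PySem.List.pyGetD_map_pyRange_of_nonneg _ m c _ hc0 hcm, e3]
  rw [e1, e2, lineVerdict_eq_specV row m x hxrow, lineVerdict_eq_specV col n x hxcol]
  -- B side: resolve the two verdict-array lookups
  have b1 : PySem.List.pyGetD (M.map (fun rw => verdictsB rw m)) r []
      = verdictsB row m := by
    rw [PySem.List.pyGetD_eq_getElem _ ([] : List (Bool × Option Int)) hr0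
      (by rw [List.length_map]; omega), List.getElem_map, ← hrow]
  have b2 : PySem.List.pyGetD ((PySem.List.pyRange 0 m).map (fun c =>
        verdictsB (M.map (fun rw => PySem.List.pyGetD rw c 0)) n)) c ([] : List (Bool × Option Int))
      = verdictsB col n :=
    PySem.List.pyGetD_map_pyRange_of_nonneg _ m c _ hc0 hcm
  have b3 : PySem.List.pyGetD (verdictsB row m) c ((false, none) : Bool × Option Int)
      = specV row m x := by
    rw [show c = (c.toNat : Int) from by omega, PySem.List.pyGetD_natCast,
      verdictsB_getD row m c.toNat hrowlen]
    congr 1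
    rw [List.getD_eq_getElem row 0 hrowlen, hxdef,
      PySem.List.pyGetD_eq_getElem row 0 hc0 (by omega)]
  have hcolx : col.getD r.toNat 0 = x := by
    rw [List.getD_eq_getElem?_getD, hcol, List.getElem?_map, List.getElem?_eq_getElem hrn']
    simp only [Option.map_some, Option.getD_some]
    rw [← hrow, ← hxdef]
  have b4 : PySem.List.pyGetD (verdictsB col n) r ((false, none) : Bool × Option Int)
      = specV col n x := by
    rw [show r = (r.toNat : Int) from by omega, PySem.List.pyGetD_natCast,
      verdictsB_getD col n r.toNat (by rw [hcol, List.length_map]; omega), hcolx]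
  rw [b1, b2, b3, b4]
  exact body_eq ans2 (specV row m x) (specV col n x)
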